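-- pv_equiv track=rewrite | github.com/holbizmetrics/prime-alphabet-finder | dimensional_analysis.py | find_collinear_triples_2d
-- ===== SOURCE A (Python) =====
-- from typing import Dict, List, Tuple, Optional
--
-- def find_collinear_triples_2d(points: List[Tuple[int, int]], primes: List[int]) -> List[Tuple]:
--     """Find collinear triples in 2D projection."""
--     collinear = []
--     n = len(points)
--
--     for i in range(n):
--         for j in range(i + 1, n):
--             for k in range(j + 1, n):
--                 # Check collinearity using cross product
--                 x1, y1 = points[i]
--                 x2, y2 = points[j]
--                 x3, y3 = points[k]
--
--                 cross = (y2 - y1) * (x3 - x2) - (y3 - y2) * (x2 - x1)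
--                 if cross == 0:
--                     collinear.append((primes[i], primes[j], primes[k]))
--
--     return collinear[:100]  # Limit results
-- ===== SOURCE B (Python) =====
-- from typing import List, Tuple
--
--
-- def _gcd(a, b):
--     # gcd of nonnegative ints (no math import in the original module)
--     while b:
--         a, b = b, a % b
--     return a
--
--
-- def _norm(dx, dy):
--     """Canonical primitive direction of (dx, dy); (0, 0) for the zero vector."""
--     g = _gcd(abs(dx), abs(dy))
--     if g == 0:
--         return (0, 0)
--     dx //= g
--     dy //= g
--     if dx < 0 or (dx == 0 and dy < 0):
--         dx, dy = -dx, -dy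
--     return (dx, dy)
--
--
-- def _merge(a, b):
--     """Merge two ascending lists into one ascending list."""
--     res = []
--     ia = ib = 0
--     while ia < len(a) and ib < len(b):
--         if a[ia] < b[ib]:
--             res.append(a[ia]); ia += 1
--         else:
--             res.append(b[ib]); ib += 1
--     res.extend(a[ia:])
--     res.extend(b[ib:])
--     return res
--
--
-- def find_collinear_triples_2d(points: List[Tuple[int, int]], primes: List[int]) -> List[Tuple]:
--     """Find collinear triples in 2D projection (slope-bucketing per anchor)."""
--     collinear = []
--     n = len(points)
--     for i in range(n):
--         xi, yi = points[i]
--         groups = {}   # canonical direction -> indices k > i on that line through i (ascending)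
--         zeros = []    # indices k > i with points[k] == points[i]
--         for k in range(i + 1, n):
--             d = _norm(points[k][0] - xi, points[k][1] - yi)
--             if d == (0, 0):
--                 zeros.append(k)
--             else:
--                 groups.setdefault(d, []).append(k)
--         for j in range(i + 1, n):
--             dj = _norm(points[j][0] - xi, points[j][1] - yi)
--             if dj == (0, 0):
--                 ks = list(range(j + 1, n))
--             else:
--                 ks = _merge([k for k in groups[dj] if k > j],
--                             [z for z in zeros if z > j])
--             for k in ks:
--                 collinear.append((primes[i], primes[j], primes[k]))
--     return collinear[:100]
-- ===== Notes on version B (the rewrite author's own statement) =====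
-- stated objective: faster
-- what changed: Instead of A's triple nested loop testing every (i,j,k) by cross product, B makes one pass per anchor i bucketing the later points in a dict keyed by their canonical (gcd-reduced, sign-fixed) direction from i, then emits for each j the merged suffixes of j's bucket and of the duplicate-of-i list, which yields the same triples in the same order.
import Mathlib
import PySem

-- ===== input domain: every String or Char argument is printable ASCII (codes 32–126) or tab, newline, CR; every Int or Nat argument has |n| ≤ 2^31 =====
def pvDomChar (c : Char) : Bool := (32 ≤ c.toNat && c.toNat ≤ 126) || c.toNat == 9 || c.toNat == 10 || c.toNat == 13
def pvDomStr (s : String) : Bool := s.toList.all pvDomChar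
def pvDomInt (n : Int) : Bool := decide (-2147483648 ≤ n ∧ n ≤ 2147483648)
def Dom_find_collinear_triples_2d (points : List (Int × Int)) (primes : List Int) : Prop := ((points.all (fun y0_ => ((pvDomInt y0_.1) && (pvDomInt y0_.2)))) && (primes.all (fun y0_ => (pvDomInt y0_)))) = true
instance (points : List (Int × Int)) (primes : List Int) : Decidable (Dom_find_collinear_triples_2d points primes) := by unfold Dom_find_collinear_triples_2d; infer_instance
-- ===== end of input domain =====

-- B replaces A's scan of all (i,j,k) triples by, per anchor i, one bucketing pass keyed on the
-- canonical (gcd-reduced, sign-fixed) direction from point i, then emits each j's bucket and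
-- duplicate-point suffixes (objective: faster).

-- ===== PORT A =====
def find_collinear_triples_2d (points : List (Int × Int)) (primes : List Int) : List (Int × Int × Int) :=
  let n : Int := points.length
  let collinear : List (Int × Int × Int) :=
    (PySem.List.pyRange 0 n 1).foldl (fun acc i =>
      (PySem.List.pyRange (i+1) n 1).foldl (fun acc j =>
        (PySem.List.pyRange (j+1) n 1).foldl (fun acc k =>
          let p1 := PySem.List.pyGetD points i (0, 0)
          let p2 := PySem.List.pyGetD points j (0, 0)
          let p3 := PySem.List.pyGetD points k (0, 0)
          let cross := (p2.2 - p1.2) * (p3.1 - p2.1) - (p3.2 - p2.2) * (p2.1 - p1.1)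
          if cross = 0 then
            acc ++ [(PySem.List.pyGetD primes i 0, PySem.List.pyGetD primes j 0, PySem.List.pyGetD primes k 0)]
          else acc) acc) acc) []
  PySem.List.slice collinear none (some 100)

-- ===== PORT B =====
-- Source B's hand-written _gcd loop 'while b: a, b = b, a % b' on nonnegative ints is exactly
-- Lean's Nat.gcd recursion with the arguments swapped.
def pyGcd (a b : Nat) : Nat := Nat.gcd b a

-- _norm of Source B: canonical primitive direction, (0, 0) for the zero vector
def normDir (dx dy : Int) : Int × Int :=
  let g : Int := (pyGcd dx.natAbs dy.natAbs : Nat)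
  if g = 0 then (0, 0)
  else
    let dx' := PySem.Int.floordiv dx g
    let dy' := PySem.Int.floordiv dy g
    if dx' < 0 ∨ (dx' = 0 ∧ dy' < 0) then (-dx', -dy') else (dx', dy')

-- _merge of Source B (same comparisons, in the same order, as its while loop; structural recursion)
def mergeAux (x : Int) (f : List Int → List Int) : List Int → List Int
  | [] => x :: f []
  | y :: ys => if x < y then x :: f (y :: ys) else y :: mergeAux x f ys

def mergeAsc : List Int → List Int → List Int
  | [], b => b
  | x :: xs, b => mergeAux x (mergeAsc xs) b

def find_collinear_triples_2d_alt (points : List (Int × Int)) (primes : List Int) : List (Int × Int × Int) :=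
  let n : Int := points.length
  let collinear : List (Int × Int × Int) :=
    (PySem.List.pyRange 0 n 1).foldl (fun acc i =>
      let pi_ := PySem.List.pyGetD points i (0, 0)
      let gz : PySem.Dict (Int × Int) (List Int) × List Int :=
        (PySem.List.pyRange (i+1) n 1).foldl (fun gz k =>
          let pk := PySem.List.pyGetD points k (0, 0)
          let d := normDir (pk.1 - pi_.1) (pk.2 - pi_.2)
          if d = (0, 0) then (gz.1, gz.2 ++ [k])
          else (gz.1.modify d [] (fun l => l ++ [k]), gz.2)) (PySem.Dict.empty, [])
      (PySem.List.pyRange (i+1) n 1).foldl (fun acc j =>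
        let pj := PySem.List.pyGetD points j (0, 0)
        let dj := normDir (pj.1 - pi_.1) (pj.2 - pi_.2)
        let ks : List Int :=
          if dj = (0, 0) then PySem.List.pyRange (j+1) n 1
          else mergeAsc ((gz.1.getD dj []).filter (fun k => decide (j < k)))
                        (gz.2.filter (fun z => decide (j < z)))
        ks.foldl (fun acc k =>
          acc ++ [(PySem.List.pyGetD primes i 0, PySem.List.pyGetD primes j 0, PySem.List.pyGetD primes k 0)]) acc) acc) []
  PySem.List.slice collinear none (some 100)

-- ===== PRECONDITION & SPEC =====
-- Pre_ excludes exactly the inputs on which A raises IndexError: some collinear triple i<j<k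
-- whose largest index k reaches past primes (A then evaluates primes[k] out of range).
def Pre_find_collinear_triples_2d (points : List (Int × Int)) (primes : List Int) : Prop :=
  ∀ i ∈ List.range points.length, ∀ j ∈ List.range points.length, ∀ k ∈ List.range points.length,
    i < j → j < k →
    ((points.getD j (0,0)).2 - (points.getD i (0,0)).2) * ((points.getD k (0,0)).1 - (points.getD j (0,0)).1)
      - ((points.getD k (0,0)).2 - (points.getD j (0,0)).2) * ((points.getD j (0,0)).1 - (points.getD i (0,0)).1) = 0 →
    k < primes.length

instance (points : List (Int × Int)) (primes : List Int) : Decidable (Pre_find_collinear_triples_2d points primes) := by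
  unfold Pre_find_collinear_triples_2d; infer_instance

def pvWitness_find_collinear_triples_2d : (List (Int × Int)) × List Int :=
  ([(0, 0), (1, 1), (2, 2)], [2, 3, 5])

def Spec_find_collinear_triples_2d (points : List (Int × Int)) (primes : List Int) (out : List (Int × Int × Int)) : Prop := out = find_collinear_triples_2d_alt points primes
instance (points : List (Int × Int)) (primes : List Int) (out : List (Int × Int × Int)) : Decidable (Spec_find_collinear_triples_2d points primes out) := by unfold Spec_find_collinear_triples_2d; infer_instance

-- ===== CLAIM (what is proved, stated in full; the proofs are below) =====
def Claim_equal_find_collinear_triples_2d : Prop := ∀ (points : List (Int × Int)) (primes : List Int), Dom_find_collinear_triples_2d points primes → Pre_find_collinear_triples_2d points primes → Spec_find_collinear_triples_2d points primes (find_collinear_triples_2d points primes)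

-- ===== LEMMAS AND PROOFS =====

lemma pyGcd_eq (a b : Nat) : pyGcd a b = Nat.gcd a b := Nat.gcd_comm b a

lemma normDir_char (a b : Int) (h : ¬(a = 0 ∧ b = 0)) :
    normDir a b = (if a / (Int.gcd a b : Int) < 0 ∨ (a / (Int.gcd a b : Int) = 0 ∧ b / (Int.gcd a b : Int) < 0)
      then (-(a / (Int.gcd a b : Int)), -(b / (Int.gcd a b : Int)))
      else (a / (Int.gcd a b : Int), b / (Int.gcd a b : Int))) := by
  have hg : (0:Int) < (Int.gcd a b : Int) := by
    have : Int.gcd a b ≠ 0 := by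
      simp [Int.gcd_eq_zero_iff]; omega
    exact_mod_cast Nat.pos_of_ne_zero this
  unfold normDir
  rw [pyGcd_eq]
  have : ((Nat.gcd a.natAbs b.natAbs : Nat) : Int) = (Int.gcd a b : Int) := by rfl
  rw [this]
  rw [if_neg (by omega)]
  rw [PySem.Int.floordiv_eq_ediv_of_pos hg, PySem.Int.floordiv_eq_ediv_of_pos hg]

lemma normDir_eq_zero_iff (a b : Int) : normDir a b = (0, 0) ↔ (a = 0 ∧ b = 0) := by
  constructor
  · intro h
    by_contra hab
    rw [normDir_char a b hab] at h
    have hg : (0:Int) < (Int.gcd a b : Int) := by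
      have : Int.gcd a b ≠ 0 := by simp [Int.gcd_eq_zero_iff]; omega
      exact_mod_cast Nat.pos_of_ne_zero this
    have hda : ((Int.gcd a b : Int)) ∣ a := Int.gcd_dvd_left a b
    have hdb : ((Int.gcd a b : Int)) ∣ b := Int.gcd_dvd_right a b
    have ha : a / (Int.gcd a b : Int) * (Int.gcd a b : Int) = a := Int.ediv_mul_cancel hda
    have hb : b / (Int.gcd a b : Int) * (Int.gcd a b : Int) = b := Int.ediv_mul_cancel hdb
    split_ifs at h with hs
    · have h1 : -(a / (Int.gcd a b : Int)) = 0 := by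
        have := congrArg Prod.fst h; simpa using this
      have h2 : -(b / (Int.gcd a b : Int)) = 0 := by
        have := congrArg Prod.snd h; simpa using this
      apply hab
      constructor
      · rw [← ha]; omega
      · rw [← hb]; omega
    · have h1 : a / (Int.gcd a b : Int) = 0 := by
        have := congrArg Prod.fst h; simpa using this
      have h2 : b / (Int.gcd a b : Int) = 0 := by
        have := congrArg Prod.snd h; simpa using this
      apply hab
      constructor
      · rw [← ha, h1]; ring
      · rw [← hb, h2]; ring
  · rintro ⟨rfl, rfl⟩; decide

lemma normDir_rep (a b : Int) (h : ¬(a = 0 ∧ b = 0)) :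
    ∃ t : Int, t ≠ 0 ∧ a = t * (normDir a b).1 ∧ b = t * (normDir a b).2 := by
  have hg : (0:Int) < (Int.gcd a b : Int) := by
    have : Int.gcd a b ≠ 0 := by simp [Int.gcd_eq_zero_iff]; omega
    exact_mod_cast Nat.pos_of_ne_zero this
  have ha : a / (Int.gcd a b : Int) * (Int.gcd a b : Int) = a := Int.ediv_mul_cancel (Int.gcd_dvd_left a b)
  have hb : b / (Int.gcd a b : Int) * (Int.gcd a b : Int) = b := Int.ediv_mul_cancel (Int.gcd_dvd_right a b)
  rw [normDir_char a b h]
  split_ifs with hs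
  · exact ⟨-(Int.gcd a b : Int), by omega, by simp; linarith [ha], by simp; linarith [hb]⟩
  · exact ⟨(Int.gcd a b : Int), by omega, by simp; linarith [ha], by simp; linarith [hb]⟩

lemma normDir_coprime (a b : Int) (h : ¬(a = 0 ∧ b = 0)) :
    Int.gcd (normDir a b).1 (normDir a b).2 = 1 := by
  have hg : Int.gcd a b ≠ 0 := by simp [Int.gcd_eq_zero_iff]; omega
  have hcop := Int.gcd_div_gcd_div_gcd (Nat.pos_of_ne_zero hg)
  rw [normDir_char a b h]
  split_ifs with hs
  · simpa [Int.neg_gcd, Int.gcd_neg] using hcop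
  · simpa using hcop

lemma normDir_canon (a b : Int) (h : ¬(a = 0 ∧ b = 0)) :
    0 < (normDir a b).1 ∨ ((normDir a b).1 = 0 ∧ 0 < (normDir a b).2) := by
  have hnz : normDir a b ≠ (0, 0) := by
    rw [Ne, normDir_eq_zero_iff]; exact h
  rw [normDir_char a b h] at hnz ⊢
  split_ifs at hnz ⊢ with hs
  · dsimp only
    omega
  · dsimp only
    rw [Ne, Prod.mk.injEq] at hnz
    omega

lemma prim_eq (u1 u2 v1 v2 : Int)
    (hu : Int.gcd u1 u2 = 1) (hv : Int.gcd v1 v2 = 1)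
    (hcu : 0 < u1 ∨ (u1 = 0 ∧ 0 < u2)) (hcv : 0 < v1 ∨ (v1 = 0 ∧ 0 < v2))
    (hx : u1 * v2 = u2 * v1) : u1 = v1 ∧ u2 = v2 := by
  have hcop_u : IsCoprime u1 u2 := Int.isCoprime_iff_gcd_eq_one.mpr hu
  have hcop_v : IsCoprime v1 v2 := Int.isCoprime_iff_gcd_eq_one.mpr hv
  have h1 : u1 ∣ v1 := hcop_u.dvd_of_dvd_mul_left ⟨v2, by linarith [hx]⟩
  have h2 : v1 ∣ u1 := hcop_v.dvd_of_dvd_mul_right ⟨u2, by linarith [hx]⟩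
  have h3 : u2 ∣ v2 := hcop_u.symm.dvd_of_dvd_mul_left ⟨v1, by linarith [hx]⟩
  have h4 : v2 ∣ u2 := hcop_v.symm.dvd_of_dvd_mul_right ⟨u1, by linarith [hx]⟩
  have e1 : u1.natAbs = v1.natAbs := Nat.dvd_antisymm (Int.natAbs_dvd_natAbs.mpr h1) (Int.natAbs_dvd_natAbs.mpr h2)
  have e2 : u2.natAbs = v2.natAbs := Nat.dvd_antisymm (Int.natAbs_dvd_natAbs.mpr h3) (Int.natAbs_dvd_natAbs.mpr h4)
  rcases hcu with hp | ⟨hz, hp2⟩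
  · have hv1 : v1 = u1 := by
      rcases hcv with hq | ⟨hq, _⟩
      · omega
      · omega
    refine ⟨hv1.symm, ?_⟩
    have := hx
    rw [hv1] at this
    have := mul_left_cancel₀ (by omega : u1 ≠ 0) (by linarith [this] : u1 * v2 = u1 * u2)
    omega
  · have hv1 : v1 = 0 := by omega
    rcases hcv with hq | ⟨_, hq2⟩
    · omega
    · omega

lemma parallel_iff (a b c d : Int) (h : ¬(a = 0 ∧ b = 0)) :
    a * d - b * c = 0 ↔ (normDir c d = normDir a b ∨ normDir c d = (0, 0)) := by
  by_cases hcd : c = 0 ∧ d = 0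
  · obtain ⟨rfl, rfl⟩ := hcd
    constructor
    · intro _; right; rw [normDir_eq_zero_iff]; exact ⟨rfl, rfl⟩
    · intro _; ring
  · obtain ⟨s, hs, ha, hb⟩ := normDir_rep a b h
    obtain ⟨t, ht, hc, hd⟩ := normDir_rep c d hcd
    have hucop := normDir_coprime a b h
    have hvcop := normDir_coprime c d hcd
    have hucan := normDir_canon a b h
    have hvcan := normDir_canon c d hcd
    have hvnz : normDir c d ≠ (0, 0) := by rw [Ne, normDir_eq_zero_iff]; exact hcd
    rcases e1 : normDir a b with ⟨u1, u2⟩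
    rcases e2 : normDir c d with ⟨v1, v2⟩
    rw [e1] at ha hb hucop hucan
    rw [e2] at hc hd hvcop hvcan hvnz
    constructor
    · intro hx
      left
      have hz : s * t * (u1 * v2 - u2 * v1) = 0 := by rw [ha, hb, hc, hd] at hx; linarith [hx]
      have hz2 : u1 * v2 - u2 * v1 = 0 := by
        rcases mul_eq_zero.mp hz with h' | h'
        · exact absurd h' (mul_ne_zero hs ht)
        · exact h'
      have := prim_eq u1 u2 v1 v2 hucop hvcop hucan hvcan (by linarith [hz2])
      simp [this.1, this.2]
    · intro hx
      rcases hx with heq | hz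
      · obtain ⟨hv1, hv2⟩ := Prod.mk.injEq .. ▸ heq
        rw [ha, hb, hc, hd, hv1, hv2]; ring
      · exact absurd hz hvnz


lemma mergeAsc_nil_right (a : List Int) : mergeAsc a [] = a := by
  cases a with
  | nil => rfl
  | cons x xs => show x :: mergeAsc xs [] = x :: xs; rw [mergeAsc_nil_right]

lemma mergeAsc_cons_cons (x y : Int) (xs ys : List Int) :
    mergeAsc (x :: xs) (y :: ys) = if x < y then x :: mergeAsc xs (y :: ys) else y :: mergeAsc (x :: xs) ys := rfl

lemma merge_filter (p q : Int → Bool) (l : List Int)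
    (hpq : ∀ x, ¬(p x = true ∧ q x = true)) (hl : l.Pairwise (· < ·)) :
    mergeAsc (l.filter p) (l.filter q) = l.filter (fun x => p x || q x) := by
  induction l with
  | nil => rfl
  | cons a l ih =>
    have ha : ∀ x ∈ l, a < x := (List.pairwise_cons.mp hl).1
    have hl' := (List.pairwise_cons.mp hl).2
    by_cases hp : p a = true
    · have hq : q a = false := by
        cases hqa : q a
        · rfl
        · exact absurd ⟨hp, hqa⟩ (hpq a)
      have step : mergeAsc (a :: l.filter p) (l.filter q) = a :: mergeAsc (l.filter p) (l.filter q) := by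
        cases hfq : l.filter q with
        | nil => rw [mergeAsc_nil_right, mergeAsc_nil_right]
        | cons y ys =>
          have hy : a < y := ha y (List.mem_of_mem_filter (hfq ▸ List.mem_cons_self))
          rw [mergeAsc_cons_cons, if_pos hy]
      simp only [List.filter_cons, hp, hq, Bool.true_or, if_true, if_false, Bool.false_eq_true]
      rw [step, ih hl']
    · have hp' : p a = false := by simpa using hp
      by_cases hq : q a = true
      · have step : mergeAsc (l.filter p) (a :: l.filter q) = a :: mergeAsc (l.filter p) (l.filter q) := by
          cases hfp : l.filter p with
          | nil => rfl
          | cons x xs =>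
            have hx : a < x := ha x (List.mem_of_mem_filter (hfp ▸ List.mem_cons_self))
            rw [mergeAsc_cons_cons, if_neg (by omega)]
        simp only [List.filter_cons, hp', hq, Bool.false_or, if_true, if_false, Bool.false_eq_true]
        rw [step, ih hl']
      · have hq' : q a = false := by simpa using hq
        simp only [List.filter_cons, hp', hq', Bool.false_or, if_false, Bool.false_eq_true]
        exact ih hl'

-- grouping pass: the dict bucket under key d, and the zero list, are filters of the scanned list
lemma group_snd (f : Int → Int × Int) (l : List Int)
    (D : PySem.Dict (Int × Int) (List Int)) (Z : List Int) :
    (l.foldl (fun gz k => if f k = (0, 0) then (gz.1, gz.2 ++ [k])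
        else (gz.1.modify (f k) [] (fun l => l ++ [k]), gz.2)) (D, Z)).2
      = Z ++ l.filter (fun k => decide (f k = (0, 0))) := by
  induction l generalizing D Z with
  | nil => simp
  | cons a l ih =>
    by_cases hfa : f a = (0, 0)
    · simp only [List.foldl_cons, if_pos hfa, List.filter_cons, decide_eq_true hfa, if_true]
      rw [ih]
      simp
    · simp only [List.foldl_cons, if_neg hfa, List.filter_cons]
      rw [ih]
      simp [hfa]

lemma group_getD (f : Int → Int × Int) (l : List Int)
    (D : PySem.Dict (Int × Int) (List Int)) (Z : List Int) (d : Int × Int) (hd : d ≠ (0, 0)) :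
    ((l.foldl (fun gz k => if f k = (0, 0) then (gz.1, gz.2 ++ [k])
        else (gz.1.modify (f k) [] (fun l => l ++ [k]), gz.2)) (D, Z)).1).getD d []
      = D.getD d [] ++ l.filter (fun k => decide (f k = d)) := by
  induction l generalizing D Z with
  | nil => simp
  | cons a l ih =>
    by_cases hfa : f a = (0, 0)
    · have hne : ¬ (f a = d) := by rw [hfa]; exact fun h => hd h.symm
      simp only [List.foldl_cons, if_pos hfa, List.filter_cons]
      rw [ih]
      simp [hne]
    · simp only [List.foldl_cons, if_neg hfa, List.filter_cons]
      rw [ih]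
      by_cases had : f a = d
      · rw [had]
        rw [PySem.Dict.getD_modify]
        simp
      · rw [PySem.Dict.getD_modify]
        simp [had, Ne.symm had]

lemma filter_lt_pyRange (a b j : Int) (haj : a ≤ j + 1) :
    (PySem.List.pyRange a b 1).filter (fun k => decide (j < k)) = PySem.List.pyRange (j+1) b 1 := by
  by_cases hjb : j + 1 ≤ b
  · rw [PySem.List.pyRange_one_append a (j+1) b haj hjb, List.filter_append]
    have h1 : (PySem.List.pyRange a (j+1) 1).filter (fun k => decide (j < k)) = [] := by
      rw [List.filter_eq_nil_iff]
      intro x hx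
      have := (PySem.List.mem_pyRange_one).mp hx
      simp only [decide_eq_true_eq]
      omega
    have h2 : (PySem.List.pyRange (j+1) b 1).filter (fun k => decide (j < k)) = PySem.List.pyRange (j+1) b 1 := by
      rw [List.filter_eq_self]
      intro x hx
      have := (PySem.List.mem_pyRange_one).mp hx
      simp only [decide_eq_true_eq]
      omega
    rw [h1, h2, List.nil_append]
  · conv_rhs => rw [PySem.List.pyRange_one_eq_nil (show b ≤ j + 1 by omega)]
    rw [List.filter_eq_nil_iff]
    intro x hx
    have := (PySem.List.mem_pyRange_one).mp hx
    simp only [decide_eq_true_eq]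
    omega

-- the per-(i,j) core: B's bucket construction yields exactly A's filtered k-range
lemma bucket_eq (f : Int → Int × Int) (i1 n j : Int) (hij : i1 ≤ j)
    (hdj : f j ≠ (0, 0)) :
    mergeAsc (((((PySem.List.pyRange i1 n 1).foldl (fun gz k => if f k = (0, 0) then (gz.1, gz.2 ++ [k])
          else (gz.1.modify (f k) [] (fun l => l ++ [k]), gz.2)) (PySem.Dict.empty, ([] : List Int))).1).getD (f j) []).filter (fun k => decide (j < k)))
      ((((PySem.List.pyRange i1 n 1).foldl (fun gz k => if f k = (0, 0) then (gz.1, gz.2 ++ [k])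
          else (gz.1.modify (f k) [] (fun l => l ++ [k]), gz.2)) (PySem.Dict.empty, ([] : List Int))).2).filter (fun z => decide (j < z)))
    = (PySem.List.pyRange (j+1) n 1).filter (fun k => decide (f k = f j ∨ f k = (0, 0))) := by
  rw [group_getD f _ _ _ _ hdj, group_snd f]
  simp only [PySem.Dict.getD_empty, List.nil_append]
  rw [List.filter_comm, List.filter_comm ((fun z => decide (j < z)))]
  rw [filter_lt_pyRange i1 n j (by omega)]
  rw [merge_filter _ _ _ (fun x hx => by
      rcases hx with ⟨h1, h2⟩
      simp only [decide_eq_true_eq] at h1 h2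
      exact hdj (h1 ▸ h2 ▸ rfl)) (PySem.List.pairwise_lt_pyRange_one (j+1) n)]
  apply List.filter_congr
  intro x _
  simp



theorem ports_eq (points : List (Int × Int)) (primes : List Int) :
    find_collinear_triples_2d points primes = find_collinear_triples_2d_alt points primes := by
  unfold find_collinear_triples_2d find_collinear_triples_2d_alt
  simp only [PySem.List.foldl_append_ite, PySem.List.foldl_append_singleton_eq_map,
    PySem.List.foldl_append_eq_flatMap, List.nil_append]
  congr 1
  apply List.flatMap_congr
  intro i hi
  apply List.flatMap_congr
  intro j hj
  have hij : i + 1 ≤ j ∧ j < points.length := by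
    have := PySem.List.mem_pyRange_one.mp hj
    omega
  by_cases hdj : normDir ((PySem.List.pyGetD points j (0, 0)).1 - (PySem.List.pyGetD points i (0, 0)).1)
      ((PySem.List.pyGetD points j (0, 0)).2 - (PySem.List.pyGetD points i (0, 0)).2) = (0, 0)
  · rw [if_pos hdj]
    congr 1
    rw [List.filter_eq_self]
    intro k _
    rw [normDir_eq_zero_iff] at hdj
    simp only [decide_eq_true_eq]
    rw [hdj.1, hdj.2]
    ring
  · rw [if_neg hdj]
    congr 1
    rw [bucket_eq (fun k => normDir ((PySem.List.pyGetD points k (0, 0)).1 - (PySem.List.pyGetD points i (0, 0)).1)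
        ((PySem.List.pyGetD points k (0, 0)).2 - (PySem.List.pyGetD points i (0, 0)).2)) (i+1) points.length j hij.1 hdj]
    apply List.filter_congr
    intro k _
    apply decide_eq_decide.mpr
    have hab : ¬((PySem.List.pyGetD points j (0, 0)).1 - (PySem.List.pyGetD points i (0, 0)).1 = 0 ∧
        (PySem.List.pyGetD points j (0, 0)).2 - (PySem.List.pyGetD points i (0, 0)).2 = 0) := by
      rw [← normDir_eq_zero_iff]; exact hdj
    have hpar := parallel_iff
      ((PySem.List.pyGetD points j (0, 0)).1 - (PySem.List.pyGetD points i (0, 0)).1)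
      ((PySem.List.pyGetD points j (0, 0)).2 - (PySem.List.pyGetD points i (0, 0)).2)
      ((PySem.List.pyGetD points k (0, 0)).1 - (PySem.List.pyGetD points i (0, 0)).1)
      ((PySem.List.pyGetD points k (0, 0)).2 - (PySem.List.pyGetD points i (0, 0)).2) hab
    constructor
    · intro hc
      exact hpar.mp (by linear_combination (-1 : Int) * hc)
    · intro hc
      have h0 := hpar.mpr hc
      linear_combination (-1 : Int) * h0

-- ===== VERDICT (by name: the statement is the Claim_ definition above) =====
theorem find_collinear_triples_2d_spec : Claim_equal_find_collinear_triples_2d := by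
  intro points primes _ _
  unfold Spec_find_collinear_triples_2d
  exact ports_eq points primes
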